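-- pv_equiv track=rewrite | github.com/mraicu/Algorithmics | prime.py | sump
-- ===== SOURCE A (Python) =====
-- def sump(l):
--     output = [0] * len(l)
--     s = 0
--     for i in range(2, len(l)):
--         if l[i] == True:
--             s += i
--             output[i] = s
--     return output
-- ===== SOURCE B (Python) =====
-- def sump(l):
--     # build-table-then-mask decomposition: contributions, running prefix sums, then mask
--     n = len(l)
--     contrib = [i if (i >= 2 and l[i] == True) else 0 for i in range(n)]
--     prefix = []
--     s = 0
--     for c in contrib:
--         s += c
--         prefix.append(s)
--     return [prefix[i] if (i >= 2 and l[i] == True) else 0 for i in range(n)]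
-- ===== Notes on version B (the rewrite author's own statement) =====
-- stated objective: alternative
-- what changed: A's single interleaved conditional-accumulation loop (mutating output in place) is replaced by a build-table-then-mask decomposition: a contribution table, a running prefix-sum pass over it, and a final masking pass.
import Mathlib
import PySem

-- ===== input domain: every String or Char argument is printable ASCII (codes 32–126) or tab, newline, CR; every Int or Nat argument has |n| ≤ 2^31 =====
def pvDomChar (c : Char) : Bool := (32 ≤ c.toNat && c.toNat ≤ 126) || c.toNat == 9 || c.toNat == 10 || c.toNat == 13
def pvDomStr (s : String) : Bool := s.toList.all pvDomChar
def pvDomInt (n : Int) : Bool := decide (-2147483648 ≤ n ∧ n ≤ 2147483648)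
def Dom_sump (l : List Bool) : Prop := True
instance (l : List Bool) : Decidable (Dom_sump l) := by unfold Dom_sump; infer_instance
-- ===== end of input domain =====

-- B replaces A's single interleaved conditional-accumulation loop by a
-- build-table-then-mask decomposition (alternative, same O(n) cost).

-- ===== PORT A =====
-- single loop over range(2, len(l)), conditionally accumulating s and writing output[i]
def sump (l : List Bool) : List Int :=
  ((PySem.List.pyRange 2 (l.length : Int) 1).foldl
    (fun (st : List Int × Int) i =>
      if PySem.List.pyGetD l i false = true then
        (PySem.List.pySetD st.1 i (st.2 + i), st.2 + i)
      else st)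
    (List.replicate l.length 0, 0)).1

-- ===== PORT B =====
-- pass 1: contribution table; pass 2: running prefix sums (prefixSums); pass 3: mask
def sump_alt (l : List Bool) : List Int :=
  let contrib : List Int :=
    (List.range l.length).map (fun i => if 2 ≤ i ∧ l.getD i false = true then (i : Int) else 0)
  let prefixSums : List Int :=
    (contrib.foldl (fun (st : List Int × Int) c => (st.1 ++ [st.2 + c], st.2 + c)) ([], 0)).1
  (List.range l.length).map
    (fun i => if 2 ≤ i ∧ l.getD i false = true then prefixSums.getD i 0 else 0)

-- ===== PRECONDITION & SPEC =====
def Spec_sump (l : List Bool) (out : List Int) : Prop := out = sump_alt l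
instance (l : List Bool) (out : List Int) : Decidable (Spec_sump l out) := by unfold Spec_sump; infer_instance

-- ===== CLAIM (what is proved, stated in full; the proofs are below) =====
def Claim_equal_sump : Prop := ∀ (l : List Bool), Dom_sump l → Spec_sump l (sump l)

-- ===== LEMMAS AND PROOFS =====

-- contribution of index j
def contribf (l : List Bool) (j : Nat) : Int :=
  if 2 ≤ j ∧ l.getD j false = true then (j : Int) else 0

-- prefix sum of contributions over range m
def psum (l : List Bool) (m : Nat) : Int := ((List.range m).map (contribf l)).sum

lemma psum_succ (l : List Bool) (m : Nat) : psum l (m + 1) = psum l m + contribf l m := by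
  simp [psum, List.range_succ]

lemma psum_of_le_two (l : List Bool) (m : Nat) (hm : m ≤ 2) : psum l m = 0 := by
  have h0 : ∀ j, j < 2 → contribf l j = 0 := by
    intro j hj
    unfold contribf
    rw [if_neg]
    rintro ⟨h1, _⟩
    omega
  interval_cases m <;> simp [psum, List.range_succ, h0]

lemma map_zero_of_le_two (l : List Bool) (m : Nat) (hm : m ≤ 2) :
    (List.range l.length).map
        (fun i => if i < m ∧ 2 ≤ i ∧ l.getD i false = true then psum l (i + 1) else 0)
      = List.replicate l.length (0 : Int) := by
  rw [List.eq_replicate_iff]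
  refine ⟨by simp, ?_⟩
  intro x hx
  simp only [List.mem_map] at hx
  obtain ⟨i, _, rfl⟩ := hx
  rw [if_neg]
  rintro ⟨h1, h2, _⟩
  omega

-- the accumulate loop of B, characterized
lemma acc_fold (xs : List Int) (a : List Int) (s : Int) :
    (xs.foldl (fun (st : List Int × Int) c => (st.1 ++ [st.2 + c], st.2 + c)) (a, s)).1
      = a ++ (List.range xs.length).map (fun i => s + (xs.take (i + 1)).sum) := by
  induction xs generalizing a s with
  | nil => simp
  | cons x xs ih =>
    simp only [List.foldl_cons, ih, List.length_cons]
    rw [List.range_succ_eq_map]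
    simp [List.append_assoc, add_assoc]

-- B equals the masked-prefix characterization
lemma sump_alt_char (l : List Bool) :
    sump_alt l = (List.range l.length).map
      (fun i => if 2 ≤ i ∧ l.getD i false = true then psum l (i + 1) else 0) := by
  show (List.range l.length).map _ = _
  apply List.map_congr_left
  intro i hi
  simp only [List.mem_range] at hi
  congr 1
  rw [acc_fold, List.nil_append]
  have hlen : i < ((List.range l.length).map
      (fun i => if 2 ≤ i ∧ l.getD i false = true then (i : Int) else 0)).length := by
    simpa using hi
  rw [List.getD_eq_getElem _ _ (by simpa using hi), List.getElem_map, List.getElem_range,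
    ← List.map_take, List.take_range, Nat.min_eq_left (by omega : i + 1 ≤ l.length)]
  simp only [zero_add, psum]
  refine congrArg List.sum (List.map_congr_left ?_)
  intro j hj
  simp [contribf, List.getD_eq_getElem?_getD]

-- A's fold, characterized: after the indices [2, m), state is the masked map and psum m
lemma sump_fold_char (l : List Bool) (m : Nat) (hm : m ≤ l.length) :
    (PySem.List.pyRange 2 (m : Int) 1).foldl
      (fun (st : List Int × Int) i =>
        if PySem.List.pyGetD l i false = true then
          (PySem.List.pySetD st.1 i (st.2 + i), st.2 + i)
        else st)
      (List.replicate l.length 0, 0)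
    = ((List.range l.length).map
        (fun i => if i < m ∧ 2 ≤ i ∧ l.getD i false = true then psum l (i + 1) else 0),
       psum l m) := by
  induction m with
  | zero =>
    rw [PySem.List.pyRange_one_eq_nil (by norm_num), List.foldl_nil,
      map_zero_of_le_two l 0 (by omega), psum_of_le_two l 0 (by omega)]
  | succ m ih =>
    have hm' : m ≤ l.length := by omega
    by_cases h2 : 2 ≤ m
    · have hcast : ((m + 1 : Nat) : Int) = (m : Int) + 1 := by push_cast; ring
      rw [hcast, PySem.List.pyRange_one_succ_right (by exact_mod_cast h2 : (2:Int) ≤ (m:Int)),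
        List.foldl_append, ih hm']
      simp only [List.foldl_cons, List.foldl_nil]
      have hget : PySem.List.pyGetD l (m : Int) false = l.getD m false := by
        simp [PySem.List.pyGetD_natCast]
      by_cases hb : l.getD m false = true
      · have hc : contribf l m = (m : Int) := by unfold contribf; rw [if_pos ⟨h2, hb⟩]
        simp only [hget, hb, if_pos]
        rw [PySem.List.pySetD_natCast]
        rw [psum_succ, hc]
        congr 1
        apply List.ext_getElem
        · simp
        · intro i h1 h1'
          simp only [List.length_map, List.length_range] at h1'
          simp only [List.getElem_set, List.getElem_map, List.getElem_range]
          by_cases hi : m = i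
          · subst hi
            rw [if_pos rfl,
              if_pos (show m < m + 1 ∧ 2 ≤ m ∧ l.getD m false = true from ⟨by omega, h2, hb⟩),
              psum_succ, hc]
          · rw [if_neg hi]
            congr 1
            simp only [eq_iff_iff]
            constructor
            · rintro ⟨ha, hbc⟩; exact ⟨by omega, hbc⟩
            · rintro ⟨ha, hbc⟩; exact ⟨by omega, hbc⟩
      · have hc : contribf l m = 0 := by
          unfold contribf
          rw [if_neg]
          rintro ⟨_, hx⟩
          exact hb hx
        simp only [hget, hb, Bool.false_eq_true, if_false]
        rw [psum_succ, hc, add_zero]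
        congr 1
        apply List.map_congr_left
        intro i hi
        congr 1
        simp only [eq_iff_iff]
        constructor
        · rintro ⟨ha, hbc⟩; exact ⟨by omega, hbc⟩
        · rintro ⟨ha, hbc⟩
          refine ⟨?_, hbc⟩
          rcases Nat.lt_succ_iff_lt_or_eq.mp ha with h | h
          · exact h
          · subst h; exact absurd hbc.2 hb
    · rw [PySem.List.pyRange_one_eq_nil
          (by exact_mod_cast (by omega : ((m : Int) + 1 ≤ 2))),
        List.foldl_nil, map_zero_of_le_two l (m + 1) (by omega),
        psum_of_le_two l (m + 1) (by omega)]

lemma sump_char (l : List Bool) :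
    sump l = (List.range l.length).map
      (fun i => if 2 ≤ i ∧ l.getD i false = true then psum l (i + 1) else 0) := by
  unfold sump
  rw [sump_fold_char l l.length le_rfl]
  apply List.map_congr_left
  intro i hi
  simp only [List.mem_range] at hi
  congr 1
  simp only [eq_iff_iff]
  constructor
  · rintro ⟨_, h⟩; exact h
  · intro h; exact ⟨hi, h⟩

-- ===== VERDICT (by name: the statement is the Claim_ definition above) =====
theorem sump_spec : Claim_equal_sump := by
  intro l _
  unfold Spec_sump
  rw [sump_char, sump_alt_char]
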